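-- pv_equiv track=rewrite | github.com/anaschen29/Int2Int | generate_int2int_data.py | _tok_int_positional
-- ===== SOURCE A (Python) =====
-- from typing import List, Tuple, Dict
--
-- def _tok_int_positional(x: int, base: int) -> List[str]:
--     sgn = "+" if x >= 0 else "-"
--     x = abs(x)
--     if x == 0:
--         return [sgn, "0"]
--     digs = []
--     while x > 0:
--         digs.append(str(x % base))
--         x //= base
--     return [sgn] + list(reversed(digs))
-- ===== SOURCE B (Python) =====
-- from typing import List
--
-- def _digits(y: int, base: int) -> List[int]:
--     # successive-quotient recursion, most-significant digit first, digits as ints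
--     return [] if y <= 0 else _digits(y // base, base) + [y % base]
--
-- def _tok_int_positional(x: int, base: int) -> List[str]:
--     sgn = "+" if x >= 0 else "-"
--     a = abs(x)
--     return [sgn] + [str(d) for d in (_digits(a, base) or [0])]
-- ===== Notes on version B (the rewrite author's own statement) =====
-- stated objective: simpler
-- what changed: Replaces A's accumulate-digit-strings-then-reverse while loop and explicit zero branch with a recursive helper that yields the integer digits most-significant-first, an 'or [0]' fallback for zero, and one final str-mapping pass.
import Mathlib
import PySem

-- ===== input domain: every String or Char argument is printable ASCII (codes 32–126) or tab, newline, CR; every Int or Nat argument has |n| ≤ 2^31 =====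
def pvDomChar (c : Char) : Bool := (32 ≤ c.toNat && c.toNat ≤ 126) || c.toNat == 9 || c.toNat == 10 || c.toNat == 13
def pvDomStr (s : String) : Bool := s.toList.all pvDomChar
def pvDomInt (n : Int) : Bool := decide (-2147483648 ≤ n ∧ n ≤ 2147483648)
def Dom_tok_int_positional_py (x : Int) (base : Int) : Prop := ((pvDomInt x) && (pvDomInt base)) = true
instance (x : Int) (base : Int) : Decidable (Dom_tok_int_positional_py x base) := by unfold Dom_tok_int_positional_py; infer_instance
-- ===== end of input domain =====

-- ===== PORT A =====
-- B replaces A's accumulate-digit-strings-then-reverse loop and zero branch with a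
-- recursive integer-digit helper, an 'or [0]' fallback and one final str-mapping pass (objective: simpler).
-- A's while loop, with fuel; fuel = |x|+1 suffices on every input admitted by Pre_ (see Pre_ comment).
def tokLoopA : Nat → Int → Int → List String → List String
  | 0, _, _, digs => digs
  | f+1, x, base, digs =>
    if 0 < x then
      tokLoopA f (PySem.Int.floordiv x base) base (digs ++ [PySem.Int.toStr (PySem.Int.mod x base)])
    else digs

def tok_int_positional_py (x : Int) (base : Int) : List String :=
  let sgn : String := if 0 ≤ x then "+" else "-"
  let ax : Int := |x|
  if ax = 0 then [sgn, "0"]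
  else sgn :: (tokLoopA (ax.toNat + 1) ax base []).reverse

-- ===== PORT B =====
-- B's recursive helper _digits (digits as integers, most-significant-first), same fuel bound.
def digitsB : Nat → Int → Int → List Int
  | 0, _, _ => []
  | f+1, y, base =>
    if y ≤ 0 then []
    else digitsB f (PySem.Int.floordiv y base) base ++ [PySem.Int.mod y base]

def tok_int_positional_py_alt (x : Int) (base : Int) : List String :=
  let sgn : String := if 0 ≤ x then "+" else "-"
  let a : Int := |x|
  let ds : List Int := digitsB (a.toNat + 1) a base
  sgn :: (if ds.isEmpty then [0] else ds).map PySem.Int.toStr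

-- ===== PRECONDITION & SPEC =====
-- Pre_ excludes base = 0 (Python A raises ZeroDivisionError) and base = 1 with x ≠ 0 (Python A loops forever).
def Pre_tok_int_positional_py (x : Int) (base : Int) : Prop := base ≠ 0 ∧ (base ≠ 1 ∨ x = 0)
instance (x : Int) (base : Int) : Decidable (Pre_tok_int_positional_py x base) := by unfold Pre_tok_int_positional_py; infer_instance
def pvWitness_tok_int_positional_py : Int × Int := (13, 10)

def Spec_tok_int_positional_py (x : Int) (base : Int) (out : List String) : Prop := out = tok_int_positional_py_alt x base
instance (x : Int) (base : Int) (out : List String) : Decidable (Spec_tok_int_positional_py x base out) := by unfold Spec_tok_int_positional_py; infer_instance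

-- ===== CLAIM (what is proved, stated in full; the proofs are below) =====
def Claim_equal_tok_int_positional_py : Prop := ∀ (x : Int) (base : Int), Dom_tok_int_positional_py x base → Pre_tok_int_positional_py x base → Spec_tok_int_positional_py x base (tok_int_positional_py x base)

-- ===== LEMMAS AND PROOFS =====
-- A's loop, reversed, is the str-image of B's integer-digit recursion (for EVERY fuel value).
theorem tokLoopA_reverse (f : Nat) : ∀ (x base : Int) (digs : List String),
    (tokLoopA f x base digs).reverse = (digitsB f x base).map PySem.Int.toStr ++ digs.reverse := by
  induction f with
  | zero => intro x base digs; simp [tokLoopA, digitsB]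
  | succ f ih =>
    intro x base digs
    by_cases hx : 0 < x
    · have hx' : ¬ x ≤ 0 := by omega
      simp [tokLoopA, digitsB, hx, hx', ih]
    · have hx' : x ≤ 0 := by omega
      simp [tokLoopA, digitsB, hx, hx']

theorem digitsB_ne_nil (f : Nat) (x base : Int) (hx : 0 < x) :
    digitsB (f + 1) x base ≠ [] := by
  have hx' : ¬ x ≤ 0 := by omega
  simp [digitsB, hx']

-- ===== VERDICT (by name: the statement is the Claim_ definition above) =====
theorem tok_int_positional_py_spec : Claim_equal_tok_int_positional_py := by
  intro x base _ _
  unfold Spec_tok_int_positional_py tok_int_positional_py tok_int_positional_py_alt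
  by_cases h : |x| = 0
  · simp [h, digitsB]
    decide
  · have hx : 0 < |x| := lt_of_le_of_ne (abs_nonneg x) (Ne.symm h)
    have hne := digitsB_ne_nil (|x|.toNat) |x| base hx
    simp [h, tokLoopA_reverse, List.isEmpty_iff, hne]
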